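-- pv_equiv track=rewrite | github.com/DemonInTheCloset/AdventOfCode2020 | day12.py | turn_two
-- ===== SOURCE A (Python) =====
-- def turn_two(instr, poss, posw):
--     d,v = instr
--     v //= 90
--
--     if d == 'L':
--         v *= -1
--
--     for _ in range(abs(v)):
--         if (v < 0):
--             posw = -posw[1], posw[0]
--         else:
--             posw = posw[1], -posw[0]
--
--     return posw
-- ===== SOURCE B (Python) =====
-- def turn_two(instr, poss, posw):
--     d, v = instr
--     v //= 90
--     if d == 'L':
--         v *= -1
--     t = v % 4
--     x, y = posw
--     if t == 0:
--         return (x, y)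
--     if t == 1:
--         return (y, -x)
--     if t == 2:
--         return (-x, -y)
--     return (-y, x)
-- ===== Notes on version B (the rewrite author's own statement) =====
-- stated objective: faster
-- what changed: Replaced the abs(v)-iteration quarter-turn loop by a closed-form four-case rotation selected by v % 4.
import Mathlib
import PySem

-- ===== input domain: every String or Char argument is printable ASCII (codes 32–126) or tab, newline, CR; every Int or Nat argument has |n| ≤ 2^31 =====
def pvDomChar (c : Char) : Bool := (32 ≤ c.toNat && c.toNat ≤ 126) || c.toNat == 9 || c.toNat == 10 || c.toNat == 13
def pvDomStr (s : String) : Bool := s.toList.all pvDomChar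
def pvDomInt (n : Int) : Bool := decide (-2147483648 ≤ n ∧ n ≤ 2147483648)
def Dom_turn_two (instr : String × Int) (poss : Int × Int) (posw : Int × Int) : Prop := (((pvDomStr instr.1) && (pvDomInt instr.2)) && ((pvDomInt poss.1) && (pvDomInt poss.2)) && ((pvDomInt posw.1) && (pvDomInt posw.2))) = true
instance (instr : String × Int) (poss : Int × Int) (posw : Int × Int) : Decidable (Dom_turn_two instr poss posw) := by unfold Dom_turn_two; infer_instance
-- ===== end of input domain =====

-- B replaces A's abs(v)-step quarter-turn loop by a closed-form four-case rotation keyed by v % 4 (faster: O(1) vs O(|v|/90)).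

-- ===== PORT A =====
-- the for-loop over range(abs(v)), rotating posw one quarter turn per step
def turn_two_loop (v : Int) (posw : Int × Int) : Nat → Int × Int
  | 0 => posw
  | n + 1 =>
      turn_two_loop v (if v < 0 then (-posw.2, posw.1) else (posw.2, -posw.1)) n

def turn_two (instr : String × Int) (poss : Int × Int) (posw : Int × Int) : Int × Int :=
  let d := instr.1
  let v := PySem.Int.floordiv instr.2 90
  let v := if d == "L" then v * (-1) else v
  turn_two_loop v posw v.natAbs

-- ===== PORT B =====
def turn_two_alt (instr : String × Int) (poss : Int × Int) (posw : Int × Int) : Int × Int :=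
  let d := instr.1
  let v0 := PySem.Int.floordiv instr.2 90
  let v := if d == "L" then v0 * (-1) else v0
  let t := PySem.Int.mod v 4
  let x := posw.1
  let y := posw.2
  if t == 0 then (x, y)
  else if t == 1 then (y, -x)
  else if t == 2 then (-x, -y)
  else (-y, x)

-- ===== PRECONDITION & SPEC =====
def Spec_turn_two (instr : String × Int) (poss : Int × Int) (posw : Int × Int) (out : Int × Int) : Prop := out = turn_two_alt instr poss posw
instance (instr : String × Int) (poss : Int × Int) (posw : Int × Int) (out : Int × Int) : Decidable (Spec_turn_two instr poss posw out) := by unfold Spec_turn_two; infer_instance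

-- ===== CLAIM (what is proved, stated in full; the proofs are below) =====
def Claim_equal_turn_two : Prop := ∀ (instr : String × Int) (poss : Int × Int) (posw : Int × Int), Dom_turn_two instr poss posw → Spec_turn_two instr poss posw (turn_two instr poss posw)

-- ===== LEMMAS AND PROOFS =====

-- closed form of B's four-way branch, indexed by a Nat remainder
def rot4 (r : Nat) (p : Int × Int) : Int × Int :=
  if r = 0 then p
  else if r = 1 then (p.2, -p.1)
  else if r = 2 then (-p.1, -p.2)
  else (-p.2, p.1)

theorem rot4_cw (m : Nat) (p : Int × Int) :
    rot4 ((m + 1) % 4) p = rot4 (m % 4) (p.2, -p.1) := by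
  have h : m % 4 = 0 ∨ m % 4 = 1 ∨ m % 4 = 2 ∨ m % 4 = 3 := by omega
  have h1 : (m + 1) % 4 = (m % 4 + 1) % 4 := by omega
  rcases h with h | h | h | h <;> simp [rot4, h1, h]

theorem rot4_ccw (m : Nat) (p : Int × Int) :
    rot4 ((4 - (m + 1) % 4) % 4) p = rot4 ((4 - m % 4) % 4) (-p.2, p.1) := by
  have h : m % 4 = 0 ∨ m % 4 = 1 ∨ m % 4 = 2 ∨ m % 4 = 3 := by omega
  have h1 : (m + 1) % 4 = (m % 4 + 1) % 4 := by omega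
  rcases h with h | h | h | h <;> simp [rot4, h1, h]

theorem loop_nonneg (v : Int) (hv : ¬ v < 0) (n : Nat) (p : Int × Int) :
    turn_two_loop v p n = rot4 (n % 4) p := by
  induction n generalizing p with
  | zero => simp [turn_two_loop, rot4]
  | succ m ih =>
      simp only [turn_two_loop, if_neg hv, ih]
      exact (rot4_cw m p).symm

theorem loop_neg (v : Int) (hv : v < 0) (n : Nat) (p : Int × Int) :
    turn_two_loop v p n = rot4 ((4 - n % 4) % 4) p := by
  induction n generalizing p with
  | zero => simp [turn_two_loop, rot4]
  | succ m ih =>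
      simp only [turn_two_loop, if_pos hv, ih]
      exact (rot4_ccw m p).symm

theorem alt_eq_rot4 (t : Int) (ht : t = 0 ∨ t = 1 ∨ t = 2 ∨ t = 3) (p : Int × Int) :
    (if t == 0 then (p.1, p.2)
     else if t == 1 then (p.2, -p.1)
     else if t == 2 then (-p.1, -p.2)
     else (-p.2, p.1)) = rot4 t.toNat p := by
  rcases ht with h | h | h | h <;> subst h <;> simp [rot4]

theorem mod4_range (v : Int) :
    PySem.Int.mod v 4 = 0 ∨ PySem.Int.mod v 4 = 1 ∨ PySem.Int.mod v 4 = 2 ∨ PySem.Int.mod v 4 = 3 := by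
  rw [PySem.Int.mod_eq_emod_of_pos (by norm_num)]
  omega

theorem core_eq (v : Int) (p : Int × Int) :
    turn_two_loop v p v.natAbs = rot4 (PySem.Int.mod v 4).toNat p := by
  rw [PySem.Int.mod_eq_emod_of_pos (by norm_num : (0:Int) < 4)]
  by_cases hv : v < 0
  · rw [loop_neg v hv]
    congr 1
    have hn : (v.natAbs : Int) = -v := by omega
    have h4 : ((v.natAbs % 4 : Nat) : Int) = (v.natAbs : Int) % 4 := by
      push_cast; ring
    omega
  · rw [loop_nonneg v hv]
    congr 1
    have h4 : ((v.natAbs % 4 : Nat) : Int) = (v.natAbs : Int) % 4 := by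
      push_cast; ring
    omega

-- ===== VERDICT (by name: the statement is the Claim_ definition above) =====
theorem turn_two_spec : Claim_equal_turn_two := by
  intro instr poss posw _
  show turn_two instr poss posw = turn_two_alt instr poss posw
  unfold turn_two turn_two_alt
  set v := if instr.1 == "L" then PySem.Int.floordiv instr.2 90 * (-1)
           else PySem.Int.floordiv instr.2 90 with hv
  rw [core_eq v posw]
  exact (alt_eq_rot4 (PySem.Int.mod v 4) (mod4_range v) posw).symm
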